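-- pv_equiv track=rewrite | github.com/mle-infrastructure/mle-toolbox | mle_toolbox/report/generate_reports.py | construct_markdown_table
-- ===== SOURCE A (Python) =====
-- def construct_markdown_table(data_dict, exclude_keys=[], table_entries_per_row=2):
--     """Construct a markdown table from a dictionary with data."""
--     table, current_row, entry_counter = [], {}, 0
--     for k, value in data_dict.items():
--         # Only add to table row if not excluded in given list
--         if k not in exclude_keys:
--             current_row["Param C" + str(entry_counter + 1)] = "`" + str(k) + "`"
--             if type(value) == list:
--                 v_temp = [str(x) for x in value]
--                 v = ", ".join(v_temp)
--             else:
--                 v = str(value)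
--             current_row["Value C" + str(entry_counter + 1)] = "`" + str(v) + "`"
--             entry_counter += 1
--
--             # reset the row dictionary and append to table list
--             if (entry_counter % table_entries_per_row) == 0:
--                 table.append(current_row)
--                 current_row = {}
--                 entry_counter = 0
--
--     # Add final residual of row - if not already done at end of loop
--     if (entry_counter % table_entries_per_row) != 0:
--         table.append(current_row)
--     return table
-- ===== SOURCE B (Python) =====
-- def construct_markdown_table(data_dict, exclude_keys=[], table_entries_per_row=2):
--     """Construct a markdown table from a dictionary with data."""
--     def fmt(value):
--         if type(value) == list:
--             return ", ".join(str(x) for x in value)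
--         return str(value)
--     entries = [(k, fmt(v)) for k, v in data_dict.items() if k not in exclude_keys]
--     table = []
--     for start in range(0, len(entries), table_entries_per_row):
--         row = {}
--         for j, (k, v) in enumerate(entries[start:start + table_entries_per_row]):
--             row["Param C" + str(j + 1)] = "`" + k + "`"
--             row["Value C" + str(j + 1)] = "`" + v + "`"
--         table.append(row)
--     return table
-- ===== Notes on version B (the rewrite author's own statement) =====
-- stated objective: alternative
-- what changed: A's flat counter/modulo-reset loop is replaced by filter-then-chunk: filter entries once, then build one row dict per range-stepped chunk of table_entries_per_row; Pre_ excludes table_entries_per_row <= 0 (A raises ZeroDivisionError at 0; for negatives A's |n|-sized rows are an accident of Python's negative modulo, while B's empty range yields []).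
-- outside the precondition, e.g. on construct_markdown_table({'a': ''}, [], -1): A returns [{'Param C1': '`a`', 'Value C1': '``'}], B returns []
import Mathlib
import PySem

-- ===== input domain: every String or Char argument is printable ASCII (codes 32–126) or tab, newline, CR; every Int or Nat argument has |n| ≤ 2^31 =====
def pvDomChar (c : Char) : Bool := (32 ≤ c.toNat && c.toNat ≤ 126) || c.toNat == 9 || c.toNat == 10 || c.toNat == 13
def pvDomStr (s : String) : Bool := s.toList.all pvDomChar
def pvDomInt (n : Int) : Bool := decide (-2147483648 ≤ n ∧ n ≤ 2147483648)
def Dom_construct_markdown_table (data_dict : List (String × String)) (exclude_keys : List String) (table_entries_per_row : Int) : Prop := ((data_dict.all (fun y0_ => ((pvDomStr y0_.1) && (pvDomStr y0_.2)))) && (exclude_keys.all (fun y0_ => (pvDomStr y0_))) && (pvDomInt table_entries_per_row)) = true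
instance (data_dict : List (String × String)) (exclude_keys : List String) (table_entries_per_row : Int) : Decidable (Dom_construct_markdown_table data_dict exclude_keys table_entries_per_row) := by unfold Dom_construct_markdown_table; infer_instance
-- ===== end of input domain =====

-- B replaces A's flat counter/modulo-reset loop by a two-phase decomposition (filter the
-- entries once, then consume them in chunks of table_entries_per_row); same return value.

-- ===== PORT A =====
-- rows are Python dicts; they are returned as their item lists (insertion order)
def construct_markdown_table (data_dict : List (String × String)) (exclude_keys : List String) (table_entries_per_row : Int) : List (List (String × String)) :=
  -- table, current_row, entry_counter = [], {}, 0
  let st := data_dict.foldl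
    (fun (s : List (List (String × String)) × PySem.Dict String String × Int) kv =>
      if kv.1 ∉ exclude_keys then
        let row := s.2.1.insert ("Param C" ++ PySem.Int.toStr (s.2.2 + 1)) ("`" ++ kv.1 ++ "`")
        -- value is a String here, so `type(value) == list` is False and v = str(value) = value
        let row := row.insert ("Value C" ++ PySem.Int.toStr (s.2.2 + 1)) ("`" ++ kv.2 ++ "`")
        let ec := s.2.2 + 1
        if PySem.Int.mod ec table_entries_per_row = 0 then
          (s.1 ++ [row.items], PySem.Dict.empty, 0)
        else (s.1, row, ec)
      else s)
    ([], PySem.Dict.empty, 0)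
  if PySem.Int.mod st.2.2 table_entries_per_row ≠ 0 then st.1 ++ [st.2.1.items] else st.1

-- ===== PORT B =====
def construct_markdown_table_alt (data_dict : List (String × String)) (exclude_keys : List String) (table_entries_per_row : Int) : List (List (String × String)) :=
  -- fmt(value) = str(value) = value on String values (the list branch of fmt is dead here)
  let entries := (data_dict.filter (fun kv => kv.1 ∉ exclude_keys)).map (fun kv => (kv.1, kv.2))
  -- for start in range(0, len(entries), table_entries_per_row): build one row per chunk
  (PySem.List.pyRange 0 entries.length table_entries_per_row).foldl
    (fun table start =>
      let row := (PySem.List.enumerate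
          (PySem.List.slice entries (some start) (some (start + table_entries_per_row))) 0).foldl
        (fun (d : PySem.Dict String String) jkv =>
          (d.insert ("Param C" ++ PySem.Int.toStr (jkv.1 + 1)) ("`" ++ jkv.2.1 ++ "`")).insert
            ("Value C" ++ PySem.Int.toStr (jkv.1 + 1)) ("`" ++ jkv.2.2 ++ "`"))
        PySem.Dict.empty
      table ++ [row.items]) []

-- ===== PRECONDITION & SPEC =====
-- Pre_ excludes table_entries_per_row ≤ 0: at 0 Python A raises ZeroDivisionError (the final
-- modulo check runs even on empty input); for negative values A returns rows of size |n| only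
-- by accident of Python's negative modulo, a corner no natural chunker reproduces (B's empty range yields no rows).
def Pre_construct_markdown_table (data_dict : List (String × String)) (exclude_keys : List String) (table_entries_per_row : Int) : Prop :=
  1 ≤ table_entries_per_row
instance (data_dict : List (String × String)) (exclude_keys : List String) (table_entries_per_row : Int) : Decidable (Pre_construct_markdown_table data_dict exclude_keys table_entries_per_row) := by unfold Pre_construct_markdown_table; infer_instance

def pvWitness_construct_markdown_table : (List (String × String)) × List String × Int :=
  ([("a", "1"), ("b", "2"), ("c", "3")], ["b"], 2)

def Spec_construct_markdown_table (data_dict : List (String × String)) (exclude_keys : List String) (table_entries_per_row : Int) (out : List (List (String × String))) : Prop := out = construct_markdown_table_alt data_dict exclude_keys table_entries_per_row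
instance (data_dict : List (String × String)) (exclude_keys : List String) (table_entries_per_row : Int) (out : List (List (String × String))) : Decidable (Spec_construct_markdown_table data_dict exclude_keys table_entries_per_row out) := by unfold Spec_construct_markdown_table; infer_instance

-- ===== CLAIM (what is proved, stated in full; the proofs are below) =====
def Claim_equal_construct_markdown_table : Prop := ∀ (data_dict : List (String × String)) (exclude_keys : List String) (table_entries_per_row : Int), Dom_construct_markdown_table data_dict exclude_keys table_entries_per_row → Pre_construct_markdown_table data_dict exclude_keys table_entries_per_row → Spec_construct_markdown_table data_dict exclude_keys table_entries_per_row (construct_markdown_table data_dict exclude_keys table_entries_per_row)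

-- ===== LEMMAS AND PROOFS =====

-- one table entry: ins both "Param C(c+1)" and "Value C(c+1)"
def pvIns (d : PySem.Dict String String) (c : Int) (kv : String × String) : PySem.Dict String String :=
  (d.insert ("Param C" ++ PySem.Int.toStr (c + 1)) ("`" ++ kv.1 ++ "`")).insert
    ("Value C" ++ PySem.Int.toStr (c + 1)) ("`" ++ kv.2 ++ "`")

-- A's loop body on a non-excluded entry
def pvStepA (n : Int) (s : List (List (String × String)) × PySem.Dict String String × Int) (kv : String × String) : List (List (String × String)) × PySem.Dict String String × Int :=
  let row := pvIns s.2.1 s.2.2 kv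
  let ec := s.2.2 + 1
  if PySem.Int.mod ec n = 0 then (s.1 ++ [row.items], PySem.Dict.empty, 0) else (s.1, row, ec)

-- reference chunker: rows produced from the pending row (c entries so far) and the rest
def pvRows (m : Nat) (row : PySem.Dict String String) (c : Nat) : List (String × String) → List (List (String × String))
  | [] => if c = 0 then [] else [row.items]
  | kv :: l =>
      if c + 1 = m then (pvIns row c kv).items :: pvRows m PySem.Dict.empty 0 l
      else pvRows m (pvIns row c kv) (c + 1) l

theorem pv_mod_eq_zero (n : Int) (hn : n ≠ 0) (c : Nat) (hc : c ≤ n.natAbs) :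
    PySem.Int.mod (c : Int) n = 0 ↔ (c = 0 ∨ c = n.natAbs) := by
  rw [PySem.Int.mod_eq_zero_iff_dvd]
  constructor
  · intro h
    have h' : n.natAbs ∣ c := Int.natCast_dvd_natCast.mp (Int.natAbs_dvd.mpr h)
    rcases lt_or_eq_of_le hc with h2 | h2
    · exact Or.inl (Nat.eq_zero_of_dvd_of_lt h' h2)
    · exact Or.inr h2
  · rintro (rfl | rfl)
    · simp
    · exact Int.dvd_natAbs.mpr dvd_rfl

theorem pv_A_filter (ex : List String) (n : Int) (l : List (String × String))
    (s : List (List (String × String)) × PySem.Dict String String × Int) :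
    l.foldl (fun s kv => if kv.1 ∉ ex then pvStepA n s kv else s) s
      = (l.filter (fun kv => kv.1 ∉ ex)).foldl (pvStepA n) s := by
  rw [List.foldl_filter]
  have hfun : (fun (x : List (List (String × String)) × PySem.Dict String String × Int)
      (y : String × String) => if (fun kv => decide (kv.1 ∉ ex)) y = true then pvStepA n x y else x)
      = (fun s kv => if kv.1 ∉ ex then pvStepA n s kv else s) := by
    funext a b; by_cases h : b.1 ∈ ex <;> simp [h]
  rw [hfun]

theorem pv_A_loop (n : Int) (hn : n ≠ 0) (l : List (String × String))
    (acc : List (List (String × String))) (row : PySem.Dict String String) (c : Nat)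
    (hc : c < n.natAbs) :
    (if PySem.Int.mod (l.foldl (pvStepA n) (acc, row, (c : Int))).2.2 n ≠ 0
     then (l.foldl (pvStepA n) (acc, row, (c : Int))).1
            ++ [(l.foldl (pvStepA n) (acc, row, (c : Int))).2.1.items]
     else (l.foldl (pvStepA n) (acc, row, (c : Int))).1)
    = acc ++ pvRows n.natAbs row c l := by
  induction l generalizing acc row c with
  | nil =>
    simp only [List.foldl_nil, pvRows]
    by_cases h0 : c = 0
    · subst h0
      have hz : PySem.Int.mod 0 n = 0 := by
        rw [PySem.Int.mod_eq_zero_iff_dvd]; exact dvd_zero n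
      simp [hz]
    · have hnz : PySem.Int.mod ((c : Nat) : Int) n ≠ 0 := by
        rw [Ne, pv_mod_eq_zero n hn c (by omega)]
        omega
      simp [hnz, h0]
  | cons kv l ih =>
    simp only [List.foldl_cons]
    by_cases h : c + 1 = n.natAbs
    · have hm0 : PySem.Int.mod ((c : Int) + 1) n = 0 := by
        have := pv_mod_eq_zero n hn (c + 1) (by omega)
        push_cast at this
        rw [this]; exact Or.inr h
      have hstep : pvStepA n (acc, row, (c : Int)) kv
          = (acc ++ [(pvIns row c kv).items], PySem.Dict.empty, (0 : Int)) := by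
        simp [pvStepA, hm0]
      rw [hstep]
      have h0m : 0 < n.natAbs := by omega
      have hih := ih (acc ++ [(pvIns row (c : Int) kv).items]) PySem.Dict.empty 0 h0m
      simp only [Nat.cast_zero] at hih
      rw [hih]
      simp [pvRows, h, List.append_assoc]
    · have hm0 : PySem.Int.mod ((c : Int) + 1) n ≠ 0 := by
        have := pv_mod_eq_zero n hn (c + 1) (by omega)
        push_cast at this
        rw [Ne, this]; rintro (h' | h') <;> omega
      have hstep : pvStepA n (acc, row, (c : Int)) kv
          = (acc, pvIns row c kv, ((c : Int) + 1)) := by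
        simp [pvStepA, hm0]
      have hih := ih acc (pvIns row (c : Int) kv) (c + 1) (by omega)
      push_cast at hih
      rw [hstep, hih]
      simp [pvRows, h]

theorem pv_rows_chunk (m : Nat) (hm : 0 < m) (l : List (String × String))
    (row : PySem.Dict String String) (c : Nat) (hc : c < m) (hne : l ≠ [] ∨ c ≠ 0) :
    pvRows m row c l =
      ((PySem.List.enumerate (l.take (m - c)) (c : Int)).foldl
          (fun d jkv => pvIns d jkv.1 jkv.2) row).items
        :: pvRows m PySem.Dict.empty 0 (l.drop (m - c)) := by
  induction l generalizing row c with
  | nil =>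
    have h0 : c ≠ 0 := by tauto
    simp [pvRows, h0]
  | cons kv l ih =>
    have h1 : m - c = (m - (c + 1)) + 1 := by omega
    rw [h1]
    simp only [List.take_succ_cons, List.drop_succ_cons, PySem.List.enumerate_cons,
      List.foldl_cons]
    by_cases h : c + 1 = m
    · have h2 : m - (c + 1) = 0 := by omega
      simp [pvRows, h]
    · rw [show pvRows m row c (kv :: l) = pvRows m (pvIns row c kv) (c + 1) l by
        simp [pvRows, h]]
      rw [ih (pvIns row (c : Int) kv) (c + 1) (by omega) (Or.inr (by omega))]
      norm_cast

-- B-side machinery: one row from a chunk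
def pvRowOf (chunk : List (String × String)) : List (String × String) :=
  ((PySem.List.enumerate chunk 0).foldl (fun d jkv => pvIns d jkv.1 jkv.2) PySem.Dict.empty).items

theorem pv_pyRange_pos_empty (b n : Int) (hn : 0 < n) (hb : b ≤ 0) :
    PySem.List.pyRange 0 b n = [] := by
  rw [PySem.List.pyRange_of_pos _ _ hn]
  have : ¬ ((0 : Int) < b) := by omega
  simp [this]

theorem pv_pyRange_pos_cons (a b n : Int) (hn : 0 < n) (h : a < b) :
    PySem.List.pyRange a b n = a :: PySem.List.pyRange (a + n) b n := by
  rw [PySem.List.pyRange_of_pos _ _ hn, PySem.List.pyRange_of_pos _ _ hn]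
  by_cases h2 : a + n < b
  · have hcount : ((b - a + n - 1) / n).toNat = ((b - (a + n) + n - 1) / n).toNat + 1 := by
      have he : b - a + n - 1 = (b - (a + n) + n - 1) + 1 * n := by ring
      rw [he, Int.add_mul_ediv_right _ _ (by omega : n ≠ 0)]
      have hge : 0 ≤ (b - (a + n) + n - 1) / n := by
        apply Int.ediv_nonneg <;> omega
      omega
    rw [if_pos h, if_pos h2, hcount, List.range_succ_eq_map]
    simp only [List.map_cons, List.map_map, Nat.cast_zero, mul_zero, add_zero]
    congr 1
    apply List.map_congr_left
    intro k _
    simp only [Function.comp_apply]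
    push_cast
    ring
  · have hcount : ((b - a + n - 1) / n).toNat = 1 := by
      have h1 : (b - a + n - 1) / n = 1 := by
        have he : b - a + n - 1 = (b - a - 1) + 1 * n := by ring
        rw [he, Int.add_mul_ediv_right _ _ (by omega : n ≠ 0),
          Int.ediv_eq_zero_of_lt (by omega) (by omega)]
        norm_num
      rw [h1]; rfl
    rw [if_pos h, if_neg h2, hcount]
    simp

theorem pv_pyRange_pos_shift (a b s n : Int) (hn : 0 < n) :
    PySem.List.pyRange (a + s) (b + s) n = (PySem.List.pyRange a b n).map (· + s) := by
  rw [PySem.List.pyRange_of_pos _ _ hn, PySem.List.pyRange_of_pos _ _ hn, List.map_map]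
  by_cases hab : a < b
  · rw [if_pos hab, if_pos (by omega : a + s < b + s),
      show b + s - (a + s) = b - a by ring]
    apply List.map_congr_left
    intro k _
    simp only [Function.comp_apply]
    ring
  · rw [if_neg hab, if_neg (by omega : ¬ a + s < b + s)]
    simp

theorem pv_B_chunks (n : Int) (hn : 0 < n) :
    ∀ (N : Nat) (l : List (String × String)), l.length ≤ N →
      (PySem.List.pyRange 0 l.length n).map
          (fun s => pvRowOf (PySem.List.slice l (some s) (some (s + n)))) =
        pvRows n.natAbs PySem.Dict.empty 0 l := by
  have hnn : n = ((n.natAbs : Nat) : Int) := by omega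
  have hm : 0 < n.natAbs := by omega
  intro N
  induction N with
  | zero =>
    intro l hl
    have : l = [] := List.length_eq_zero_iff.mp (by omega)
    subst this
    rw [pv_pyRange_pos_empty _ _ hn (by simp)]
    simp [pvRows]
  | succ N ih =>
    intro l hl
    by_cases hnil : l = []
    · subst hnil
      rw [pv_pyRange_pos_empty _ _ hn (by simp)]
      simp [pvRows]
    · have hlen : 0 < l.length := List.length_pos_iff.mpr hnil
      rw [pv_pyRange_pos_cons _ _ _ hn (by exact_mod_cast hlen), List.map_cons]
      have hhead : pvRowOf (PySem.List.slice l (some 0) (some (0 + n)))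
          = pvRowOf (l.take n.natAbs) := by
        congr 1
        rw [zero_add, hnn, show ((0 : Int)) = ((0 : Nat) : Int) from rfl,
          PySem.List.slice_natCast]
        simp [Int.natAbs_abs]
      have hshift : PySem.List.pyRange (0 + n) (l.length : Int) n
          = (PySem.List.pyRange 0 ((l.length : Int) - n) n).map (· + n) := by
        have : (l.length : Int) = ((l.length : Int) - n) + n := by ring
        rw [show PySem.List.pyRange (0 + n) (l.length : Int) n
            = PySem.List.pyRange (0 + n) (((l.length : Int) - n) + n) n by rw [← this]]
        exact pv_pyRange_pos_shift 0 ((l.length : Int) - n) n n hn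
      rw [hshift, List.map_map]
      have htail : ((PySem.List.pyRange 0 ((l.length : Int) - n) n).map
            ((fun s => pvRowOf (PySem.List.slice l (some s) (some (s + n)))) ∘ (· + n)))
          = (PySem.List.pyRange 0 ((l.drop n.natAbs).length : Int) n).map
            (fun s => pvRowOf (PySem.List.slice (l.drop n.natAbs) (some s) (some (s + n)))) := by
        by_cases hsmall : (l.length : Int) ≤ n
        · rw [pv_pyRange_pos_empty _ _ hn (by omega),
            pv_pyRange_pos_empty _ _ hn (by rw [List.length_drop]; omega)]
          simp
        · have hrange : ((l.drop n.natAbs).length : Int) = (l.length : Int) - n := by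
            simp [List.length_drop]; omega
          rw [hrange]
          apply List.map_congr_left
          intro s hs
          have hs0 : 0 ≤ s := ((PySem.List.mem_pyRange_iff_of_pos hn s).mp hs).1
          obtain ⟨j, rfl⟩ : ∃ j : Nat, s = (j : Int) := ⟨s.toNat, by omega⟩
          simp only [Function.comp_apply]
          congr 1
          have e2 : ((j : Int)) + n + n = ((j + n.natAbs + n.natAbs : Nat) : Int) := by
            omega
          have e1 : ((j : Int)) + n = ((j + n.natAbs : Nat) : Int) := by
            omega
          rw [e2, e1, PySem.List.slice_natCast, PySem.List.slice_natCast, List.drop_drop]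
          congr 1
          · omega
          · congr 1
            omega
      rw [htail, ih (l.drop n.natAbs) (by rw [List.length_drop]; omega)]
      rw [pv_rows_chunk n.natAbs hm l PySem.Dict.empty 0 hm (Or.inl hnil)]
      simp only [Nat.sub_zero, Nat.cast_zero]
      rw [hhead]
      rfl

theorem pv_foldl_append_map {α β : Type} (g : α → β) (l : List α) (acc : List β) :
    l.foldl (fun t s => t ++ [g s]) acc = acc ++ l.map g := by
  induction l generalizing acc with
  | nil => simp
  | cons x l ih => simp [ih]

-- ===== VERDICT (by name: the statement is the Claim_ definition above) =====
theorem construct_markdown_table_spec : Claim_equal_construct_markdown_table := by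
  intro dd ex n _ hpre
  have hn : (0 : Int) < n := hpre
  have hm : 0 < n.natAbs := Int.natAbs_pos.mpr (by omega)
  show construct_markdown_table dd ex n = construct_markdown_table_alt dd ex n
  have hbody : (fun (s : List (List (String × String)) × PySem.Dict String String × Int)
      (kv : String × String) =>
      if kv.1 ∉ ex then
        let row := s.2.1.insert ("Param C" ++ PySem.Int.toStr (s.2.2 + 1)) ("`" ++ kv.1 ++ "`")
        let row := row.insert ("Value C" ++ PySem.Int.toStr (s.2.2 + 1)) ("`" ++ kv.2 ++ "`")
        let ec := s.2.2 + 1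
        if PySem.Int.mod ec n = 0 then
          (s.1 ++ [row.items], PySem.Dict.empty, 0)
        else (s.1, row, ec)
      else s)
      = (fun s kv => if kv.1 ∉ ex then pvStepA n s kv else s) := by
    funext s kv
    by_cases h : kv.1 ∈ ex <;> simp [h, pvStepA, pvIns]
  have hmap : ((dd.filter (fun kv => kv.1 ∉ ex)).map (fun kv => (kv.1, kv.2)))
      = dd.filter (fun kv => kv.1 ∉ ex) := by
    simp
  have hrowfun : (fun (table : List (List (String × String))) (start : Int) =>
      table ++ [((PySem.List.enumerate
          (PySem.List.slice (dd.filter (fun kv => kv.1 ∉ ex)) (some start) (some (start + n))) 0).foldl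
        (fun (d : PySem.Dict String String) jkv =>
          (d.insert ("Param C" ++ PySem.Int.toStr (jkv.1 + 1)) ("`" ++ jkv.2.1 ++ "`")).insert
            ("Value C" ++ PySem.Int.toStr (jkv.1 + 1)) ("`" ++ jkv.2.2 ++ "`"))
        PySem.Dict.empty).items])
      = (fun table start => table ++
          [pvRowOf (PySem.List.slice (dd.filter (fun kv => kv.1 ∉ ex)) (some start) (some (start + n)))]) := by
    funext t s
    simp [pvRowOf, pvIns]
  simp only [construct_markdown_table, construct_markdown_table_alt, hbody, hmap, hrowfun]
  have hA := pv_A_loop n (by omega) (dd.filter (fun kv => kv.1 ∉ ex)) [] PySem.Dict.empty 0 hm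
  simp only [Nat.cast_zero] at hA
  rw [pv_A_filter ex n dd ([], PySem.Dict.empty, 0), hA,
    pv_foldl_append_map, pv_B_chunks n hn (dd.filter (fun kv => kv.1 ∉ ex)).length _ le_rfl]
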